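-- pv_equiv track=rewrite | github.com/PICMG/iot-foundry-pldm-agent | tools/pldm-mapping-wizard/pdr_units_to_ucum.py | pldm_multiply_combine
-- ===== SOURCE A (Python) =====
-- from collections import Counter
--
-- def pldm_multiply_combine(strings):
--     """
--     Combine PLDM unit codes by multiplication to get a combined UCUM string.
--
--     Args:
--         strings (list): List of PLDM unit strings to combine.
--
--     Returns:
--         str: The resulting UCUM string.
--     """
--     # Return an empty string for empty input
--     if not strings:
--         return ""
--
--     cnt = Counter(strings)
--     # sort keys for deterministic output
--     parts = []
--     for key in sorted(cnt.keys()):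
--         if key == "":
--             continue
--         count = cnt[key]
--         if count > 1:
--             parts.append(f"{key}{count}")
--         else:
--             parts.append(key)
--     return ".".join(parts)
-- ===== SOURCE B (Python) =====
-- def pldm_multiply_combine(strings):
--     """
--     Combine PLDM unit codes by multiplication to get a combined UCUM string.
--
--     Sort-then-scan: one run-length pass over the sorted list, no count dict.
--     """
--     ordered = sorted(strings)
--     parts = []
--     i = 0
--     total = len(ordered)
--     while i < total:
--         key = ordered[i]
--         j = i + 1
--         while j < total and ordered[j] == key:
--             j += 1
--         run = j - i
--         if key != "":
--             parts.append(f"{key}{run}" if run > 1 else key)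
--         i = j
--     return ".".join(parts)
-- ===== Notes on version B (the rewrite author's own statement) =====
-- stated objective: alternative
-- what changed: Replaced the Counter hash table plus sorted-keys iteration with per-key lookups by a single run-length scan over the sorted list that maintains only the current run.
import Mathlib
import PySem

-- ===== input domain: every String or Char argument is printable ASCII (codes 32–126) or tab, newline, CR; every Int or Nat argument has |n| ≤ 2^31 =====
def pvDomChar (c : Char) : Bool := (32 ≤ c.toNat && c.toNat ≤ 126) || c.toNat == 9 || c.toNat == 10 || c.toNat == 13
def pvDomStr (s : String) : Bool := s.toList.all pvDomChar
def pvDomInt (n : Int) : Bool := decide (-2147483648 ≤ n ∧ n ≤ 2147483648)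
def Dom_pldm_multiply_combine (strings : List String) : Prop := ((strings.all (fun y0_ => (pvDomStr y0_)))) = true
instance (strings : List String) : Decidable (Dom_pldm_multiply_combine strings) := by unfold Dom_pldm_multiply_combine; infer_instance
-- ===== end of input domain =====

-- B replaces A's Counter dict + sorted-keys + per-key lookup by one run-length scan of the sorted list (alternative decomposition, same cost).

-- ===== PORT A =====
def pldm_multiply_combine (strings : List String) : String :=
  if strings = [] then ""
  else
    let cnt := PySem.Dict.counter strings
    let parts : List String := (PySem.List.sorted cnt.keys (fun k => k) false).foldl
      (fun parts key =>
        if key = "" then parts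
        else
          let count := cnt.getD key 0
          if count > 1 then parts ++ [key ++ PySem.Int.toStr count]
          else parts ++ [key]) []
    PySem.Str.join "." parts

-- ===== PORT B =====
-- outer while of Source B: each step scans one run (the inner while = takeWhile/dropWhile)
def pldm_multiply_combine_alt_groups : List String → List (String × Int)
  | [] => []
  | x :: xs =>
    (x, ((xs.takeWhile (fun y => y == x)).length : Int) + 1) ::
      pldm_multiply_combine_alt_groups (xs.dropWhile (fun y => y == x))
  termination_by xs => xs.length
  decreasing_by
    simpa using Nat.lt_succ_of_le (List.length_dropWhile_le _ _)

def pldm_multiply_combine_alt (strings : List String) : String :=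
  let ordered := PySem.List.sorted strings (fun k => k) false
  let parts : List String := (pldm_multiply_combine_alt_groups ordered).foldl
    (fun parts kr =>
      if kr.1 ≠ "" then
        parts ++ [if kr.2 > 1 then kr.1 ++ PySem.Int.toStr kr.2 else kr.1]
      else parts) []
  PySem.Str.join "." parts

-- ===== PRECONDITION & SPEC =====
def Spec_pldm_multiply_combine (strings : List String) (out : String) : Prop := out = pldm_multiply_combine_alt strings
instance (strings : List String) (out : String) : Decidable (Spec_pldm_multiply_combine strings out) := by unfold Spec_pldm_multiply_combine; infer_instance

-- ===== CLAIM (what is proved, stated in full; the proofs are below) =====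
def Claim_equal_pldm_multiply_combine : Prop := ∀ (strings : List String), Dom_pldm_multiply_combine strings → Spec_pldm_multiply_combine strings (pldm_multiply_combine strings)

-- ===== LEMMAS AND PROOFS =====

-- after dropping the leading run of x from a ≤-sorted tail, every element is strictly above x
lemma alt_groups_lt {x : String} {xs : List String}
    (h : (x :: xs).Pairwise (· ≤ ·)) :
    ∀ y ∈ xs.dropWhile (fun y => y == x), x < y := by
  induction xs with
  | nil => simp
  | cons a as ih =>
    rcases List.pairwise_cons.1 h with ⟨hx, ha⟩
    by_cases hax : a = x
    · subst hax
      rw [List.dropWhile_cons_of_pos (by simp)]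
      refine ih (List.pairwise_cons.2 ⟨fun y hy => hx y (List.mem_cons_of_mem _ hy),
        (List.pairwise_cons.1 ha).2⟩)
    · rw [List.dropWhile_cons_of_neg (by simp [hax])]
      intro y hy
      rcases List.mem_cons.1 hy with rfl | hy'
      · exact lt_of_le_of_ne (hx _ (List.mem_cons_self ..)) (Ne.symm hax)
      · exact lt_of_lt_of_le (lt_of_le_of_ne (hx a (List.mem_cons_self ..)) (Ne.symm hax))
          ((List.pairwise_cons.1 ha).1 y hy')

-- run-length groups of a ≤-sorted list: counts are global counts, keys strictly increase and cover s
lemma alt_groups_spec : ∀ s : List String, s.Pairwise (· ≤ ·) →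
    (∀ p ∈ pldm_multiply_combine_alt_groups s, (s.count p.1 : Int) = p.2 ∧ p.1 ∈ s) ∧
    ((pldm_multiply_combine_alt_groups s).map Prod.fst).Pairwise (· < ·) ∧
    (∀ x ∈ s, x ∈ (pldm_multiply_combine_alt_groups s).map Prod.fst) := by
  intro s
  induction s using pldm_multiply_combine_alt_groups.induct with
  | case1 => intro _; simp [pldm_multiply_combine_alt_groups]
  | case2 x xs ih =>
    intro h
    have hpxs : xs.Pairwise (· ≤ ·) := (List.pairwise_cons.1 h).2
    have hx : ∀ y ∈ xs, x ≤ y := (List.pairwise_cons.1 h).1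
    have hpw_d : (xs.dropWhile (fun y => y == x)).Pairwise (· ≤ ·) :=
      List.Pairwise.sublist (List.dropWhile_sublist _) hpxs
    have hd_lt := alt_groups_lt h
    have hmem_t : ∀ y ∈ xs.takeWhile (fun y => y == x), y = x := by
      intro y hy
      simpa using List.mem_takeWhile_imp hy
    have htd : xs.takeWhile (fun y => y == x) ++ xs.dropWhile (fun y => y == x) = xs :=
      List.takeWhile_append_dropWhile
    obtain ⟨ihc, ihp, ihcov⟩ := ih hpw_d
    rw [pldm_multiply_combine_alt_groups]
    refine ⟨?_, ?_, ?_⟩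
    · intro p hp
      rcases List.mem_cons.1 hp with rfl | hp'
      · refine ⟨?_, List.mem_cons_self ..⟩
        have h1 : (xs.takeWhile (fun y => y == x)).count x
            = (xs.takeWhile (fun y => y == x)).length :=
          List.count_eq_length.2 (fun b hb => (hmem_t b hb).symm)
        have h2 : (xs.dropWhile (fun y => y == x)).count x = 0 :=
          List.count_eq_zero.2 (fun hmem => lt_irrefl x (hd_lt x hmem))
        have hcx : xs.count x = (xs.takeWhile (fun y => y == x)).length := by
          conv_lhs => rw [← htd]
          rw [List.count_append, h1, h2]
          omega
        rw [List.count_cons_self, hcx]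
        push_cast
        ring
      · obtain ⟨hc, hmem⟩ := ihc p hp'
        have hxlt : x < p.1 := hd_lt _ hmem
        constructor
        · have hc1 : (xs.takeWhile (fun y => y == x)).count p.1 = 0 :=
            List.count_eq_zero.2 (fun hmem' => ne_of_gt hxlt (hmem_t _ hmem'))
          have hcc : xs.count p.1 = (xs.dropWhile (fun y => y == x)).count p.1 := by
            conv_lhs => rw [← htd]
            rw [List.count_append, hc1]
            omega
          rw [List.count_cons_of_ne (Ne.symm (ne_of_gt hxlt)), hcc]
          exact hc
        · exact List.mem_cons_of_mem _ ((List.dropWhile_sublist _).mem hmem)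
    · rw [List.map_cons]
      refine List.pairwise_cons.2 ⟨?_, ihp⟩
      intro y hy
      rcases List.mem_map.1 hy with ⟨p, hp, rfl⟩
      exact hd_lt _ (ihc p hp).2
    · intro z hz
      rcases List.mem_cons.1 hz with rfl | hz'
      · exact List.mem_cons_self ..
      · rw [← htd, List.mem_append] at hz'
        rcases hz' with h1 | h2
        · rw [hmem_t z h1]; exact List.mem_cons_self ..
        · exact List.mem_cons_of_mem _ (ihcov z h2)

-- A's sorted Counter keys are exactly the group keys of the sorted input
lemma keys_sorted_eq (strings : List String) :
    PySem.List.sorted (PySem.Dict.counter strings).keys (fun k => k) false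
      = (pldm_multiply_combine_alt_groups
          (PySem.List.sorted strings (fun k => k) false)).map Prod.fst := by
  have hpw : (PySem.List.sorted strings (fun k => k) false).Pairwise (· ≤ ·) := by
    simpa using PySem.List.sorted_pairwise (xs := strings) (key := fun k => k)
  obtain ⟨hcnt, hlt, hcov⟩ := alt_groups_spec _ hpw
  have hperm := PySem.List.sorted_perm (xs := strings) (key := (fun k => k)) (rev := false)
  apply PySem.List.sorted_eq_of_perm_of_pairwise_lt
  · rw [PySem.Dict.keys_counter]
    refine (List.perm_ext_iff_of_nodup ?_ ?_).2 ?_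
    · exact List.Pairwise.imp (fun h => ne_of_lt h) hlt
    · exact PySem.Set.nodup_ofList strings
    · intro a
      rw [PySem.Set.mem_ofList]
      constructor
      · intro ha
        rcases List.mem_map.1 ha with ⟨p, hp, rfl⟩
        exact hperm.mem_iff.1 (hcnt p hp).2
      · intro ha
        exact hcov a (hperm.mem_iff.2 ha)
  · simpa using hlt

-- the two per-key folds build the same parts list when the lookup agrees with the run length
lemma fold_eq (c : String → Int) : ∀ (l : List (String × Int)) (acc : List String),
    (∀ p ∈ l, c p.1 = p.2) →
    (l.map Prod.fst).foldl
      (fun parts key => if key = "" then parts else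
        if c key > 1 then parts ++ [key ++ PySem.Int.toStr (c key)] else parts ++ [key]) acc
    = l.foldl (fun parts kr => if kr.1 ≠ "" then
        parts ++ [if kr.2 > 1 then kr.1 ++ PySem.Int.toStr kr.2 else kr.1] else parts) acc := by
  intro l
  induction l with
  | nil => intro acc _; rfl
  | cons p ps ih =>
    intro acc h
    have hp : c p.1 = p.2 := h p (List.mem_cons_self ..)
    simp only [List.map_cons, List.foldl_cons]
    rw [ih _ (fun q hq => h q (List.mem_cons_of_mem _ hq))]
    congr 1
    by_cases h0 : p.1 = "" <;> by_cases h2 : p.2 > 1 <;> simp [h0, h2, hp]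

theorem pldm_multiply_combine_spec : Claim_equal_pldm_multiply_combine := by
  intro strings _
  unfold Spec_pldm_multiply_combine
  by_cases hnil : strings = []
  · subst hnil
    have hsort : PySem.List.sorted ([] : List String) (fun k => k) false = [] :=
      PySem.List.sorted_eq_self_of_pairwise [] (fun k => k) (by simp)
    simp only [pldm_multiply_combine, pldm_multiply_combine_alt, hsort,
      pldm_multiply_combine_alt_groups, List.foldl_nil]
    rfl
  · simp only [pldm_multiply_combine, pldm_multiply_combine_alt, if_neg hnil]
    congr 1
    rw [keys_sorted_eq]
    apply fold_eq
    intro p hp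
    have hpw : (PySem.List.sorted strings (fun k => k) false).Pairwise (· ≤ ·) := by
      simpa using PySem.List.sorted_pairwise (xs := strings) (key := fun k => k)
    obtain ⟨hcnt, _, _⟩ := alt_groups_spec _ hpw
    have hperm := PySem.List.sorted_perm (xs := strings) (key := (fun k => k)) (rev := false)
    rw [PySem.Dict.getD_counter, ← hperm.count_eq]
    exact (hcnt p hp).1
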